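-- pv_equiv track=rewrite | github.com/hvuhsg/mongolite | pymongolite/backend/utils.py | update_with_fields
-- ===== SOURCE A (Python) =====
-- def update_with_fields(document: dict, fields: dict):
--     if not fields:
--         return document
--
--     if next(iter(fields.values())) == 0:
--         new_doc = document
--     else:
--         new_doc = {}
--
--     for field, include in fields.items():
--         if include and field in document:
--             new_doc[field] = document[field]
--         else:
--             new_doc.pop(field, None)
--
--     return new_doc
-- ===== SOURCE B (Python) =====
-- def update_with_fields(document: dict, fields: dict):
--     if not fields:
--         return document
--
--     if next(iter(fields.values())) == 0:
--         # exclude mode: precompute the excluded-key set, then traverse the DOCUMENT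
--         # once, keeping only non-excluded entries; write the result back into the
--         # same document object (same mutation/aliasing as A) and return it.
--         excluded = {f for f, inc in fields.items() if not inc}
--         kept = [(k, v) for k, v in list(document.items()) if k not in excluded]
--         document.clear()
--         document.update(kept)
--         return document
--
--     # include mode: precompute the present-key set, then project the truthy,
--     # present fields straight into a new dict.
--     present = set(document)
--     return {f: document[f] for f, inc in fields.items() if inc and f in present}
-- ===== Notes on version B (the rewrite author's own statement) =====
-- stated objective: alternative
-- what changed: B replaces A's single insert/pop loop over fields by staged passes over precomputed key sets: exclude mode builds the excluded-key set and filters the DOCUMENT once (writing the kept entries back into the same object), include mode builds the document's key set and projects the truthy present fields into a new dict; no per-field pop/reinsert steps remain.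
import Mathlib
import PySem

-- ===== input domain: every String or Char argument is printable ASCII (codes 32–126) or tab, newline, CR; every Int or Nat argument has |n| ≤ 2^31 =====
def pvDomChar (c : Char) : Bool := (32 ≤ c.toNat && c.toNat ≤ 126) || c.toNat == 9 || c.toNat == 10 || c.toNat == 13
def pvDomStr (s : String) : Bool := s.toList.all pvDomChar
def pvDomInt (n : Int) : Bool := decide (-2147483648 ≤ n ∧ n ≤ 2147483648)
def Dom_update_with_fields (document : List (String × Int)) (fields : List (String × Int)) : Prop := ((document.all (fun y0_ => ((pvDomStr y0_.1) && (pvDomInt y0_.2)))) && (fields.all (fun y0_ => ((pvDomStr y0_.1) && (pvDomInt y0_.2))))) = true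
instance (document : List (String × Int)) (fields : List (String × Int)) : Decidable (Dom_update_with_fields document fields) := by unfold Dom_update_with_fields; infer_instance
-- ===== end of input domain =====

-- B replaces A's insert/pop loop over fields by staged passes over precomputed key sets:
-- exclude mode filters the DOCUMENT against the excluded-key set (writing the result back into
-- the same object, the same mutation as A), include mode projects the truthy present fields;
-- equivalence proved for the RETURN value on assoc lists with distinct keys.


-- ===== PORT A =====
-- In exclude mode new_doc IS document (aliasing), so 'field in document' / 'document[field]'
-- see the loop's own mutations: modelled by threading the single dict through the fold.
-- 'include and field in document' = include truthy (≠ 0) and key present; pop(field, None) = erase.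
def update_with_fields (document : List (String × Int)) (fields : List (String × Int)) : List (String × Int) :=
  match fields with
  | [] => document                                    -- if not fields: return document
  | (_, v0) :: _ =>
    if v0 == 0 then                                   -- next(iter(fields.values())) == 0: new_doc = document
      (fields.foldl
        (fun nd p =>
          if p.2 ≠ 0 ∧ nd.contains p.1 = true then nd.insert p.1 (nd.getD p.1 0)
          else nd.erase p.1)
        (PySem.Dict.mk document)).items
    else                                              -- new_doc = {}
      (fields.foldl
        (fun nd p =>
          if p.2 ≠ 0 ∧ (PySem.Dict.mk document).contains p.1 = true then
            nd.insert p.1 ((PySem.Dict.mk document).getD p.1 0)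
          else nd.erase p.1)
        (PySem.Dict.empty : PySem.Dict String Int)).items

-- ===== PORT B =====
def update_with_fields_alt (document : List (String × Int)) (fields : List (String × Int)) : List (String × Int) :=
  match fields with
  | [] => document
  | (_, v0) :: _ =>
    if v0 == 0 then
      -- exclude mode: excluded = {f for f, inc in fields.items() if not inc};
      -- kept = [(k, v) for k, v in document.items() if k not in excluded]; document := kept
      let excluded : PySem.Set String :=
        PySem.Set.ofList ((fields.filter (fun p => p.2 == 0)).map Prod.fst)
      document.filter (fun q => !(PySem.Set.contains excluded q.1))
    else
      -- include mode: present = set(document);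
      -- {f: document[f] for f, inc in fields.items() if inc and f in present}
      let present : PySem.Set String := PySem.Set.ofList (document.map Prod.fst)
      ((fields.filter (fun p => p.2 != 0 && PySem.Set.contains present p.1)).foldl
        (fun nd p => nd.insert p.1 ((PySem.Dict.mk document).getD p.1 0))
        (PySem.Dict.empty : PySem.Dict String Int)).items

-- ===== PRECONDITION & SPEC =====
-- Pre_ is the dict invariant of the type convention: both association lists stand for Python
-- dicts, whose keys are distinct. A returns on every input; no further narrowing.
def Pre_update_with_fields (document : List (String × Int)) (fields : List (String × Int)) : Prop :=
  (document.map Prod.fst).Nodup ∧ (fields.map Prod.fst).Nodup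
instance (document : List (String × Int)) (fields : List (String × Int)) : Decidable (Pre_update_with_fields document fields) := by unfold Pre_update_with_fields; infer_instance

def pvWitness_update_with_fields : (List (String × Int)) × (List (String × Int)) :=
  ([("a", 1), ("b", 2)], [("a", 1), ("c", 0)])

def Spec_update_with_fields (document : List (String × Int)) (fields : List (String × Int)) (out : List (String × Int)) : Prop := out = update_with_fields_alt document fields
instance (document : List (String × Int)) (fields : List (String × Int)) (out : List (String × Int)) : Decidable (Spec_update_with_fields document fields out) := by unfold Spec_update_with_fields; infer_instance

-- ===== CLAIM (what is proved, stated in full; the proofs are below) =====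
def Claim_equal_update_with_fields : Prop := ∀ (document : List (String × Int)) (fields : List (String × Int)), Dom_update_with_fields document fields → Pre_update_with_fields document fields → Spec_update_with_fields document fields (update_with_fields document fields)

-- ===== LEMMAS AND PROOFS =====

-- a dict with distinct keys cannot hold two different pairs with the same key
theorem pv_eq_of_mem_items {l : List (String × Int)} (hnd : (l.map Prod.fst).Nodup)
    {p q : String × Int} (hp : p ∈ l) (hq : q ∈ l) (h : p.1 = q.1) : p = q :=
  List.inj_on_of_nodup_map hnd hp hq h

theorem pv_contains_exists {d : PySem.Dict String Int} {k : String}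
    (hc : d.contains k = true) : ∃ v, (k, v) ∈ d.items := by
  simp only [PySem.Dict.contains, List.any_eq_true, beq_iff_eq] at hc
  obtain ⟨⟨a, b⟩, hp, he⟩ := hc
  exact ⟨b, he ▸ hp⟩

-- erasing an absent key is a no-op
theorem pv_erase_absent {d : PySem.Dict String Int} {k : String}
    (hc : d.contains k = false) : d.erase k = d := by
  apply PySem.Dict.ext
  simp only [PySem.Dict.erase]
  apply List.filter_eq_self.2
  intro p hp
  simp only [PySem.Dict.contains] at hc
  rw [List.any_eq_false] at hc
  simp [hc p hp]

-- re-inserting the value a key already has leaves the dict unchanged (distinct keys)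
theorem pv_insert_getD_self {d : PySem.Dict String Int} {k : String}
    (hnd : (d.items.map Prod.fst).Nodup) (hc : d.contains k = true) :
    d.insert k (d.getD k 0) = d := by
  obtain ⟨v, hv⟩ := pv_contains_exists hc
  have hgd : d.getD k 0 = v := PySem.Dict.getD_of_mem_items d hv hnd 0
  apply PySem.Dict.ext
  rw [PySem.Dict.items_insert_of_contains d _ hc, hgd]
  have hmap : ∀ p ∈ d.items, (if (p.1 == k) = true then (k, v) else p) = id p := by
    intro p hp
    by_cases h : p.1 = k
    · have : p = (k, v) := pv_eq_of_mem_items hnd hp hv h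
      simp [this]
    · simp [h]
  rw [List.map_congr_left hmap, List.map_id]

-- keys stay distinct through erase
theorem pv_nodup_erase (d : PySem.Dict String Int) (k : String)
    (hnd : (d.items.map Prod.fst).Nodup) : ((d.erase k).items.map Prod.fst).Nodup := by
  simp only [PySem.Dict.erase]
  exact hnd.sublist (List.filter_sublist.map Prod.fst)

-- A's exclude-mode loop over the aliased document reduces to a loop of pure pops
theorem pv_exclude_fold (fs : List (String × Int)) (nd : PySem.Dict String Int)
    (hnd : (nd.items.map Prod.fst).Nodup) :
    fs.foldl
      (fun nd p =>
        if p.2 ≠ 0 ∧ nd.contains p.1 = true then nd.insert p.1 (nd.getD p.1 0)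
        else nd.erase p.1) nd
    = fs.foldl (fun d p => if p.2 == 0 then d.erase p.1 else d) nd := by
  induction fs generalizing nd with
  | nil => rfl
  | cons p t ih =>
    rw [List.foldl_cons, List.foldl_cons]
    have hstep : (if p.2 ≠ 0 ∧ nd.contains p.1 = true then nd.insert p.1 (nd.getD p.1 0)
          else nd.erase p.1)
        = (if p.2 == 0 then nd.erase p.1 else nd) := by
      by_cases hz : p.2 = 0
      · rw [if_neg (by simp [hz]), if_pos (by simpa using hz)]
      · rw [if_neg (show ¬((p.2 == 0) = true) by simpa using hz)]
        by_cases hc : nd.contains p.1 = true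
        · rw [if_pos ⟨hz, hc⟩, pv_insert_getD_self hnd hc]
        · rw [if_neg (by simp [hc]), pv_erase_absent (by simpa using hc)]
    rw [hstep]
    by_cases hz : p.2 = 0
    · rw [if_pos (show (p.2 == 0) = true by simpa using hz)]
      exact ih _ (pv_nodup_erase _ _ hnd)
    · rw [if_neg (show ¬((p.2 == 0) = true) by simpa using hz)]
      exact ih _ hnd

-- a loop of pops IS the document filtered against the popped-key list
theorem pv_pop_fold_items (fs : List (String × Int)) (d : PySem.Dict String Int) :
    (fs.foldl (fun d p => if p.2 == 0 then d.erase p.1 else d) d).items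
    = d.items.filter
        (fun q => !(((fs.filter (fun p => p.2 == 0)).map Prod.fst).contains q.1)) := by
  induction fs generalizing d with
  | nil => simp
  | cons p t ih =>
    rw [List.foldl_cons]
    by_cases hz : (p.2 == 0) = true
    · rw [if_pos hz, ih]
      simp only [PySem.Dict.erase, List.filter_filter]
      apply List.filter_congr
      intro q _
      simp only [List.filter_cons, hz, if_true, List.map_cons]
      by_cases h : q.1 = p.1 <;> simp [List.contains_eq_mem, h]
    · rw [if_neg hz, ih]
      simp only [List.filter_cons, hz]
      simp

-- membership in the built key set = membership among the keys
theorem pv_set_contains_ofList (l : List String) (k : String) :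
    PySem.Set.contains (PySem.Set.ofList l) k = l.contains k := by
  simp only [PySem.Set.contains, List.contains_eq_mem, PySem.Set.mem_ofList]

-- 'f in set(document)' = 'f in document'
theorem pv_present_eq_contains (document : List (String × Int)) (k : String) :
    PySem.Set.contains (PySem.Set.ofList (document.map Prod.fst)) k
    = (PySem.Dict.mk document).contains k := by
  rw [pv_set_contains_ofList]
  simp only [PySem.Dict.contains, List.contains_eq_mem]
  by_cases h : k ∈ document.map Prod.fst
  · obtain ⟨q, hq, hk⟩ := List.mem_map.1 h
    simp only [h, decide_true]
    exact Eq.symm ((List.any_eq_true).2 ⟨q, hq, by simp [hk]⟩)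
  · simp only [h, decide_false]
    symm
    rw [List.any_eq_false]
    intro q hq
    simp only [beq_iff_eq]
    intro he
    exact h (List.mem_map.2 ⟨q, hq, he⟩)

-- A's include-mode loop: on fresh distinct keys the insert/erase loop is the guarded insert loop
theorem pv_include_fold (doc : PySem.Dict String Int) (fs : List (String × Int))
    (nd : PySem.Dict String Int) (hnd : (fs.map Prod.fst).Nodup)
    (hfresh : ∀ k ∈ fs.map Prod.fst, nd.contains k = false) :
    fs.foldl
      (fun nd p =>
        if p.2 ≠ 0 ∧ doc.contains p.1 = true then nd.insert p.1 (doc.getD p.1 0)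
        else nd.erase p.1) nd
    = fs.foldl
        (fun nd p =>
          if (p.2 != 0 && doc.contains p.1) = true then nd.insert p.1 (doc.getD p.1 0)
          else nd) nd := by
  induction fs generalizing nd with
  | nil => rfl
  | cons p t ih =>
    have hpk : nd.contains p.1 = false := hfresh p.1 (by simp)
    rw [List.map_cons, List.nodup_cons] at hnd
    obtain ⟨hpnot, hndt⟩ := hnd
    rw [List.foldl_cons, List.foldl_cons]
    by_cases hcond : p.2 ≠ 0 ∧ doc.contains p.1 = true
    · rw [if_pos hcond, if_pos (by simp [bne_iff_ne, hcond.1, hcond.2])]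
      refine ih _ hndt ?_
      intro k hk
      rw [PySem.Dict.contains_insert]
      have hkp : k ≠ p.1 := fun h => hpnot (h ▸ hk)
      simp [hkp, hfresh k (by simp [hk])]
    · rw [if_neg hcond, if_neg (fun hb => hcond (by simpa [bne_iff_ne] using hb)),
        pv_erase_absent hpk]
      exact ih _ hndt (fun k hk => hfresh k (by simp [hk]))

-- ===== VERDICT (by name: the statement is the Claim_ definition above) =====
theorem update_with_fields_spec : Claim_equal_update_with_fields := by
  intro document fields _ hpre
  obtain ⟨hdoc, hflds⟩ := hpre
  unfold Spec_update_with_fields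
  rcases fields with _ | ⟨⟨f0, v0⟩, t⟩
  · rfl
  · simp only [update_with_fields, update_with_fields_alt]
    by_cases h0 : (v0 == 0) = true
    · rw [if_pos h0, if_pos h0, pv_exclude_fold _ _ hdoc, pv_pop_fold_items]
      apply List.filter_congr
      intro q _
      rw [pv_set_contains_ofList]
    · rw [if_neg h0, if_neg h0, List.foldl_filter,
        pv_include_fold (PySem.Dict.mk document) _ _ hflds (fun k _ => rfl)]
      congr 2
      funext nd p
      rw [pv_present_eq_contains]
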